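-- pv_equiv track=rewrite | github.com/flowerspower/python_class_code | USACO_training/beads2.py | find_max_beads
-- ===== SOURCE A (Python) =====
-- def find_max_beads(beads_string):
--     array_columns = len(beads_string) * 2
--     len_beads = len(beads_string)
--     beads_string = beads_string + beads_string
--     left_r = [0 for i in range(array_columns)]
--     left_b = [0 for i in range(array_columns)]
--     for i in range(array_columns - 1):
--         next_bead = beads_string[i]
--         if next_bead == 'r':
--             left_b[i+1] = 0
--             left_r[i+1] = left_r[i]+1
--         elif next_bead == 'b':
--             left_b[i+1] = left_b[i]+1
--             left_r[i+1] = 0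
--         else:
--             left_b[i+1] = left_b[i]+1
--             left_r[i+1] = left_r[i]+1
--
--     right_r = [0 for i in range(array_columns)]
--     right_b = [0 for i in range(array_columns)]
--     next_bead = beads_string[-1]
--     if next_bead == 'r':
--         right_b[-1] = 0
--         right_r[-1] = 1
--     elif next_bead == 'b':
--         right_b[-1] = 1
--         right_r[-1] = 0
--     else:
--         right_b[-1] = 1
--         right_r[-1] = 1
--
--     for i in range(array_columns - 1, 0, -1):
--         next_bead = beads_string[i-1]
--         if next_bead == 'r':
--             right_b[i-1] = 0
--             right_r[i-1] = right_r[i]+1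
--         elif next_bead == 'b':
--             right_b[i-1] = right_b[i]+1
--             right_r[i-1] = 0
--         else:
--             right_b[i-1] = right_b[i]+1
--             right_r[i-1] = right_r[i]+1
--
--     max_right = [0 for i in range(array_columns)]
--     max_left = [0 for i in range(array_columns)]
--     max_overall = [0 for i in range(array_columns)]
--     for i in range(array_columns):
--         max_right[i] = max(right_b[i], right_r[i])
--         max_left[i] = max(left_b[i], left_r[i])
--         max_overall[i] = max_left[i] + max_right[i]
--     return min(max(max_overall), len_beads)
-- ===== SOURCE B (Python) =====
-- def find_max_beads(beads_string):
--     n = len(beads_string)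
--     s2 = beads_string + beads_string
--
--     def run(chars, bad):
--         count = 0
--         for ch in chars:
--             if ch == bad:
--                 break
--             count += 1
--         return count
--
--     best = 0
--     for i in range(2 * n):
--         before = s2[:i][::-1]
--         after = s2[i:]
--         left = max(run(before, 'b'), run(before, 'r'))
--         right = max(run(after, 'b'), run(after, 'r'))
--         best = max(best, left + right)
--     return min(best, n)
-- ===== Notes on version B (the rewrite author's own statement) =====
-- stated objective: simpler
-- what changed: A fills six DP arrays by index assignment in three passes over the doubled string and then takes the max of a seventh derived array; B keeps no arrays at all: for each break point it directly scans the prefix backwards and the suffix forwards counting beads (white matching both colours) and keeps a running maximum, capped at the necklace length.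
import Mathlib
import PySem

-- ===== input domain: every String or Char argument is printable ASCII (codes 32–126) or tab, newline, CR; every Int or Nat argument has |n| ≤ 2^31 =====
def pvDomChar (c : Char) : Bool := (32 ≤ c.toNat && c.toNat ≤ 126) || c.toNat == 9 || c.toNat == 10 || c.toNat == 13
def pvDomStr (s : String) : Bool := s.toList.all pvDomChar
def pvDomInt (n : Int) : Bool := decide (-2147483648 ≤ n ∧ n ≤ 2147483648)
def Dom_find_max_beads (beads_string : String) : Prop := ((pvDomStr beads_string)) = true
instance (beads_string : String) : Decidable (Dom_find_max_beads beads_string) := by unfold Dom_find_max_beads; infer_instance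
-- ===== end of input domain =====

-- B replaces A's six index-assigned DP arrays (three passes over the doubled string) by a direct
-- per-break-point scan keeping only a running maximum — no arrays at all (objective: simpler).

-- ===== PORT A =====
-- loop body of A's first loop (st = (left_r, left_b))
def pvStepL (bs : List Char) (st : List Int × List Int) (i : Int) : List Int × List Int :=
  let next_bead := PySem.List.pyGetD bs i ' '
  if next_bead = 'r' then
    (PySem.List.pySetD st.1 (i+1) (PySem.List.pyGetD st.1 i 0 + 1), PySem.List.pySetD st.2 (i+1) 0)
  else if next_bead = 'b' then
    (PySem.List.pySetD st.1 (i+1) 0, PySem.List.pySetD st.2 (i+1) (PySem.List.pyGetD st.2 i 0 + 1))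
  else
    (PySem.List.pySetD st.1 (i+1) (PySem.List.pyGetD st.1 i 0 + 1), PySem.List.pySetD st.2 (i+1) (PySem.List.pyGetD st.2 i 0 + 1))

-- loop body of A's countdown loop (st = (right_r, right_b))
def pvStepR (bs : List Char) (st : List Int × List Int) (i : Int) : List Int × List Int :=
  let next_bead := PySem.List.pyGetD bs (i-1) ' '
  if next_bead = 'r' then
    (PySem.List.pySetD st.1 (i-1) (PySem.List.pyGetD st.1 i 0 + 1), PySem.List.pySetD st.2 (i-1) 0)
  else if next_bead = 'b' then
    (PySem.List.pySetD st.1 (i-1) 0, PySem.List.pySetD st.2 (i-1) (PySem.List.pyGetD st.2 i 0 + 1))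
  else
    (PySem.List.pySetD st.1 (i-1) (PySem.List.pyGetD st.1 i 0 + 1), PySem.List.pySetD st.2 (i-1) (PySem.List.pyGetD st.2 i 0 + 1))

-- loop body of A's last loop (st = (max_right, max_left, max_overall))
def pvStepM (left_r left_b right_r right_b : List Int)
    (st : List Int × List Int × List Int) (i : Int) : List Int × List Int × List Int :=
  let max_right := PySem.List.pySetD st.1 i (max (PySem.List.pyGetD right_b i 0) (PySem.List.pyGetD right_r i 0))
  let max_left := PySem.List.pySetD st.2.1 i (max (PySem.List.pyGetD left_b i 0) (PySem.List.pyGetD left_r i 0))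
  let max_overall := PySem.List.pySetD st.2.2 i (PySem.List.pyGetD max_left i 0 + PySem.List.pyGetD max_right i 0)
  (max_right, max_left, max_overall)

-- Python strings are ported as their List Char ('beads_string + beads_string' is list append);
-- indexing is PySem.List.pyGetD (in these loops every index is in range on inputs inside Pre_).
def find_max_beads (beads_string : String) : Int :=
  let array_columns : Int := PySem.Str.len beads_string * 2
  let len_beads : Int := PySem.Str.len beads_string
  let bs : List Char := beads_string.toList ++ beads_string.toList
  let zeros : List Int := (PySem.List.pyRange 0 array_columns 1).map (fun _ => 0)
  let lst := (PySem.List.pyRange 0 (array_columns - 1) 1).foldl (pvStepL bs) (zeros, zeros)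
  let next_bead := PySem.List.pyGetD bs (-1) ' '
  let rinit : List Int × List Int :=
    if next_bead = 'r' then (PySem.List.pySetD zeros (-1) 1, PySem.List.pySetD zeros (-1) 0)
    else if next_bead = 'b' then (PySem.List.pySetD zeros (-1) 0, PySem.List.pySetD zeros (-1) 1)
    else (PySem.List.pySetD zeros (-1) 1, PySem.List.pySetD zeros (-1) 1)
  let rst := (PySem.List.pyRange (array_columns - 1) 0 (-1)).foldl (pvStepR bs) rinit
  let mst := (PySem.List.pyRange 0 array_columns 1).foldl
      (pvStepM lst.1 lst.2 rst.1 rst.2) (zeros, zeros, zeros)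
  min ((PySem.List.max? mst.2.2 (fun x => x)).getD 0) len_beads

-- ===== PORT B =====
-- Source B's inner 'run(chars, bad)': count leading chars different from bad (structural recursion)
def pvRun : List Char → Char → Int
  | [], _ => 0
  | c :: rest, bad => if c = bad then 0 else 1 + pvRun rest bad

-- s2[:i][::-1] is reverse of the slice (PySem.List.slice?_none_none_neg_one); s2[i:] is slice from i.
def find_max_beads_alt (beads_string : String) : Int :=
  let n : Int := PySem.Str.len beads_string
  let s2 : List Char := beads_string.toList ++ beads_string.toList
  let best := (PySem.List.pyRange 0 (2 * n) 1).foldl (fun best i =>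
    let before := (PySem.List.slice s2 none (some i)).reverse
    let after := PySem.List.slice s2 (some i) none
    let left := max (pvRun before 'b') (pvRun before 'r')
    let right := max (pvRun after 'b') (pvRun after 'r')
    max best (left + right)) 0
  min best n

-- ===== PRECONDITION & SPEC =====
-- Pre_ excludes only the empty string, on which A raises IndexError at beads_string[-1].
def Pre_find_max_beads (beads_string : String) : Prop := beads_string ≠ ""
instance (beads_string : String) : Decidable (Pre_find_max_beads beads_string) := by
  unfold Pre_find_max_beads; infer_instance
def pvWitness_find_max_beads : String := "rwbr"

def Spec_find_max_beads (beads_string : String) (out : Int) : Prop := out = find_max_beads_alt beads_string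
instance (beads_string : String) (out : Int) : Decidable (Spec_find_max_beads beads_string out) := by
  unfold Spec_find_max_beads; infer_instance

-- ===== CLAIM (what is proved, stated in full; the proofs are below) =====
def Claim_equal_find_max_beads : Prop := ∀ (beads_string : String), Dom_find_max_beads beads_string → Pre_find_max_beads beads_string → Spec_find_max_beads beads_string (find_max_beads beads_string)

-- ===== LEMMAS AND PROOFS =====

-- the run lengths B computes, as functions of the break index: exactly the values A's DP arrays
-- hold (left_r = pvL · 'b', left_b = pvL · 'r', right_r = pvR · 'b', right_b = pvR · 'r')
def pvL (L : List Char) (bad : Char) (j : Nat) : Int := pvRun ((L.take j).reverse) bad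
def pvR (L : List Char) (bad : Char) (j : Nat) : Int := pvRun (L.drop j) bad
def pvG (L : List Char) (j : Nat) : Int :=
  max (pvL L 'r' j) (pvL L 'b' j) + max (pvR L 'r' j) (pvR L 'b' j)
def pvMk (N : Nat) (f : Nat → Int) : List Int := (List.range N).map f

lemma pvRun_nonneg (cs : List Char) (bad : Char) : 0 ≤ pvRun cs bad := by
  induction cs with
  | nil => simp [pvRun]
  | cons c rest ih => simp only [pvRun]; split <;> omega

lemma pvG_nonneg (L : List Char) (j : Nat) : 0 ≤ pvG L j := by
  have h1 := pvRun_nonneg ((L.take j).reverse) 'r'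
  have h2 := pvRun_nonneg (L.drop j) 'r'
  simp only [pvG, pvL, pvR]
  omega

lemma set_map_range {α : Type} (f : Nat → α) (N j : Nat) (_hj : j < N) (v : α) :
    ((List.range N).map f).set j v = (List.range N).map (fun t => if t = j then v else f t) := by
  apply List.ext_getElem (by simp)
  intro i h1 h2
  simp only [List.getElem_set, List.getElem_map, List.getElem_range]
  by_cases h : i = j
  · simp [h]
  · simp [h, Ne.symm h]

lemma pvMk_set (N : Nat) (f : Nat → Int) (j : Nat) (hj : j < N) (v : Int) :
    (pvMk N f).set j v = pvMk N (fun t => if t = j then v else f t) := set_map_range f N j hj v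

lemma pvMk_congr (N : Nat) (f g : Nat → Int) (h : ∀ j < N, f j = g j) : pvMk N f = pvMk N g :=
  List.map_congr_left (fun x hx => h x (List.mem_range.mp hx))

lemma pvMk_pyGetD (N : Nat) (h : Nat → Int) (k : Nat) (hk : k < N) :
    PySem.List.pyGetD (pvMk N h) ((k : Nat) : Int) 0 = h k := by
  rw [PySem.List.pyGetD_natCast]; simp [pvMk, List.getD_eq_getElem?_getD, hk]

lemma pySetD_mk_neg_one (N : Nat) (f : Nat → Int) (v : Int) (h : 1 ≤ N) :
    PySem.List.pySetD (pvMk N f) (-1) v = (pvMk N f).set (N-1) v := by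
  have hl : (pvMk N f).length = N := by simp [pvMk]
  have hidx : PySem.List.pyIdx? N (-1) = some (N - 1) := by
    simp [PySem.List.pyIdx?]; omega
  simp [PySem.List.pySetD, PySem.List.pySet?, hl, hidx]

lemma pvL_succ (L : List Char) (bad : Char) (j : Nat) (hj : j < L.length) :
    pvL L bad (j+1) = if L[j] = bad then 0 else pvL L bad j + 1 := by
  have ht : L.take (j+1) = L.take j ++ [L[j]] := by
    rw [List.take_add_one]; simp [List.getElem?_eq_getElem hj]
  simp only [pvL, ht, List.reverse_append, List.reverse_cons, List.reverse_nil, List.nil_append,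
    List.cons_append, pvRun]
  split <;> omega

lemma pvR_eq (L : List Char) (bad : Char) (j : Nat) (hj : j < L.length) :
    pvR L bad j = if L[j] = bad then 0 else pvR L bad (j+1) + 1 := by
  simp only [pvR, List.drop_eq_getElem_cons hj, pvRun]
  split <;> omega

lemma pvStepL_mk (L : List Char) (N : Nat) (hN : N = L.length) (k : Nat) (hk : k + 1 < N)
    (f g : Nat → Int) :
    pvStepL L (pvMk N f, pvMk N g) (k : Int) =
      (pvMk N (fun t => if t = k + 1 then (if L[k]'(by omega) = 'b' then 0 else f k + 1) else f t),
       pvMk N (fun t => if t = k + 1 then (if L[k]'(by omega) = 'r' then 0 else g k + 1) else g t)) := by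
  have hkN : k < N := by omega
  have hgf := pvMk_pyGetD N f k hkN
  have hgg := pvMk_pyGetD N g k hkN
  have hgc : PySem.List.pyGetD L (k : Int) ' ' = L[k]'(by omega) := by
    simp only [PySem.List.pyGetD_natCast]
    exact List.getD_eq_getElem L ' ' (by omega)
  have hcast : (k : Int) + 1 = ((k + 1 : Nat) : Int) := by push_cast; ring
  simp only [pvStepL, hgf, hgg, hgc, hcast, PySem.List.pySetD_natCast]
  simp only [pvMk_set N f (k+1) hk, pvMk_set N g (k+1) hk]
  by_cases hr : L[k]'(by omega) = 'r'
  · simp [hr]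
  · by_cases hb : L[k]'(by omega) = 'b' <;> simp [hr, hb]

lemma leftLoop (L : List Char) (N : Nat) (hN : N = L.length) (k : Nat) (hk : k ≤ N - 1) :
    (PySem.List.pyRange 0 (k : Int) 1).foldl (pvStepL L) (pvMk N (fun _ => 0), pvMk N (fun _ => 0)) =
      (pvMk N (fun j => if j ≤ k then pvL L 'b' j else 0),
       pvMk N (fun j => if j ≤ k then pvL L 'r' j else 0)) := by
  induction k with
  | zero =>
    rw [show ((0:Nat):Int) = 0 by norm_num, PySem.List.pyRange_one_eq_nil (le_refl 0)]
    simp only [List.foldl_nil, Prod.mk.injEq]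
    refine ⟨?_, ?_⟩ <;> · apply pvMk_congr; intro j hj; rcases j with _ | j <;> simp [pvL, pvRun]
  | succ k ih =>
    have hk1 : k + 1 < N := by omega
    have hkk : k ≤ N - 1 := by omega
    have hc : ((k+1 : Nat) : Int) = (k : Int) + 1 := by push_cast; ring
    rw [hc, PySem.List.pyRange_one_succ_right (by positivity), List.foldl_append, ih hkk]
    simp only [List.foldl_cons, List.foldl_nil]
    rw [pvStepL_mk L N hN k hk1]
    have hkL : k < L.length := by omega
    simp only [Prod.mk.injEq]
    refine ⟨?_, ?_⟩ <;>
    · apply pvMk_congr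
      intro j hj
      by_cases hjk : j = k + 1
      · subst hjk
        simp only [le_refl, pvL_succ L _ k hkL]
        simp
      · have : (j ≤ k) ↔ (j ≤ k + 1) := by omega
        simp [hjk, this]

lemma pvStepR_mk (L : List Char) (N : Nat) (hN : N = L.length) (a : Nat) (ha : a + 1 < N)
    (f g : Nat → Int) :
    pvStepR L (pvMk N f, pvMk N g) ((a + 1 : Nat) : Int) =
      (pvMk N (fun t => if t = a then (if L[a]'(by omega) = 'b' then 0 else f (a+1) + 1) else f t),
       pvMk N (fun t => if t = a then (if L[a]'(by omega) = 'r' then 0 else g (a+1) + 1) else g t)) := by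
  have haN : a < N := by omega
  have hc : ((a + 1 : Nat) : Int) - 1 = ((a : Nat) : Int) := by push_cast; ring
  have hgf := pvMk_pyGetD N f (a+1) ha
  have hgg := pvMk_pyGetD N g (a+1) ha
  have hgc : PySem.List.pyGetD L ((a:Nat) : Int) ' ' = L[a]'(by omega) := by
    simp only [PySem.List.pyGetD_natCast]
    exact List.getD_eq_getElem L ' ' (by omega)
  simp only [pvStepR, hc, hgf, hgg, hgc, PySem.List.pySetD_natCast]
  simp only [pvMk_set N f a haN, pvMk_set N g a haN]
  by_cases hr : L[a]'(by omega) = 'r'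
  · simp [hr]
  · by_cases hb : L[a]'(by omega) = 'b' <;> simp [hr, hb]

lemma rightLoop (L : List Char) (N : Nat) (hN : N = L.length) (a : Nat) (ha : a ≤ N - 1) :
    (PySem.List.pyRange (a : Int) 0 (-1)).foldl (pvStepR L)
      (pvMk N (fun j => if a ≤ j then pvR L 'b' j else 0),
       pvMk N (fun j => if a ≤ j then pvR L 'r' j else 0)) =
      (pvMk N (fun j => pvR L 'b' j), pvMk N (fun j => pvR L 'r' j)) := by
  induction a with
  | zero =>
    rw [show ((0:Nat):Int) = 0 by norm_num, PySem.List.pyRange_neg_one_eq_nil (le_refl 0)]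
    simp only [List.foldl_nil, Prod.mk.injEq]
    refine ⟨?_, ?_⟩ <;> · apply pvMk_congr; intro j hj; simp
  | succ a ih =>
    have ha1 : a + 1 < N := by omega
    have haL : a < L.length := by omega
    rw [PySem.List.pyRange_neg_one_cons (by positivity)]
    simp only [List.foldl_cons]
    rw [show ((a+1:Nat):Int) - 1 = ((a:Nat):Int) by push_cast; ring]
    rw [pvStepR_mk L N hN a ha1]
    have hstep : ∀ bad : Char,
        (fun t => if t = a then (if L[a]'(by omega) = bad then 0 else (if a+1 ≤ a+1 then pvR L bad (a+1) else 0) + 1)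
         else if a+1 ≤ t then pvR L bad t else 0) =
        fun j => if a ≤ j then pvR L bad j else 0 := by
      intro bad; funext t
      by_cases ht : t = a
      · subst ht
        simp [pvR_eq L bad t haL]
      · have : (a + 1 ≤ t) ↔ (a ≤ t) := by omega
        simp [ht, this]
    rw [hstep 'b', hstep 'r']
    exact ih (by omega)

lemma rinitLemma (L : List Char) (N : Nat) (hN : N = L.length) (h1 : 1 ≤ N) :
    (if PySem.List.pyGetD L (-1) ' ' = 'r' then
       (PySem.List.pySetD (pvMk N fun _ => 0) (-1) 1, PySem.List.pySetD (pvMk N fun _ => 0) (-1) 0)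
     else if PySem.List.pyGetD L (-1) ' ' = 'b' then
       (PySem.List.pySetD (pvMk N fun _ => 0) (-1) 0, PySem.List.pySetD (pvMk N fun _ => 0) (-1) 1)
     else (PySem.List.pySetD (pvMk N fun _ => 0) (-1) 1, PySem.List.pySetD (pvMk N fun _ => 0) (-1) 1)) =
    (pvMk N (fun j => if N-1 ≤ j then pvR L 'b' j else 0),
     pvMk N (fun j => if N-1 ≤ j then pvR L 'r' j else 0)) := by
  have hne : L ≠ [] := by intro h; rw [h] at hN; simp at hN; omega
  have hN1 : N - 1 < L.length := by omega
  have hlast : PySem.List.pyGetD L (-1) ' ' = L[N-1]'hN1 := by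
    rw [PySem.List.pyGetD_neg_one L ' ' hne, List.getLast_eq_getElem]
    congr 1; omega
  have hR : ∀ bad : Char, pvR L bad (N-1) = if L[N-1]'hN1 = bad then 0 else 1 := by
    intro bad
    rw [pvR_eq L bad (N-1) hN1]
    by_cases hb : L[N-1]'hN1 = bad
    · simp [hb]
    · have : pvR L bad (N-1+1) = 0 := by
        have hlen : N - 1 + 1 = L.length := by omega
        simp [pvR, hlen, pvRun]
      simp [hb, this]
  have hsetfix : ∀ v : Int, PySem.List.pySetD (pvMk N fun _ => 0) (-1) v =
      pvMk N (fun t => if t = N-1 then v else 0) := by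
    intro v; rw [pySetD_mk_neg_one N _ v h1, pvMk_set N _ (N-1) (by omega)]
  have hcongr : ∀ (v : Int) (bad : Char), v = pvR L bad (N-1) →
      pvMk N (fun t => if t = N-1 then v else 0) = pvMk N (fun j => if N-1 ≤ j then pvR L bad j else 0) := by
    intro v bad hv
    apply pvMk_congr; intro j hj
    by_cases hjN : j = N-1
    · simp [hjN, hv]
    · have h2 : ¬ (N-1 ≤ j) := by omega
      simp [hjN, h2]
  rw [hlast]
  split_ifs with hr hb
  · rw [hsetfix, hsetfix, hcongr 1 'b' (by simp [hR, hr]), hcongr 0 'r' (by simp [hR, hr])]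
  · rw [hsetfix, hsetfix, hcongr 0 'b' (by simp [hR, hb]), hcongr 1 'r' (by simp [hR, hb])]
  · rw [hsetfix]
    simp only [Prod.mk.injEq]
    exact ⟨hcongr 1 'b' (by simp [hR, hb]), hcongr 1 'r' (by simp [hR, hr])⟩

lemma pvStepM_mk (L : List Char) (N : Nat) (k : Nat) (hk : k < N) (F1 F2 F3 : Nat → Int) :
    pvStepM (pvMk N (pvL L 'b')) (pvMk N (pvL L 'r')) (pvMk N (pvR L 'b')) (pvMk N (pvR L 'r'))
      (pvMk N F1, pvMk N F2, pvMk N F3) ((k : Nat) : Int) =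
      (pvMk N (fun t => if t = k then max (pvR L 'r' k) (pvR L 'b' k) else F1 t),
       pvMk N (fun t => if t = k then max (pvL L 'r' k) (pvL L 'b' k) else F2 t),
       pvMk N (fun t => if t = k then pvG L k else F3 t)) := by
  simp only [pvStepM, pvMk_pyGetD N _ k hk, PySem.List.pySetD_natCast]
  simp only [pvMk_set N _ k hk]
  simp only [pvMk_pyGetD N _ k hk]
  simp [pvG, max_comm]

lemma mLoop (L : List Char) (N : Nat) (k : Nat) (hk : k ≤ N) :
    (PySem.List.pyRange 0 (k : Int) 1).foldl
      (pvStepM (pvMk N (pvL L 'b')) (pvMk N (pvL L 'r')) (pvMk N (pvR L 'b')) (pvMk N (pvR L 'r')))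
      (pvMk N (fun _ => 0), pvMk N (fun _ => 0), pvMk N (fun _ => 0)) =
      (pvMk N (fun j => if j < k then max (pvR L 'r' j) (pvR L 'b' j) else 0),
       pvMk N (fun j => if j < k then max (pvL L 'r' j) (pvL L 'b' j) else 0),
       pvMk N (fun j => if j < k then pvG L j else 0)) := by
  induction k with
  | zero =>
    rw [show ((0:Nat):Int) = 0 by norm_num, PySem.List.pyRange_one_eq_nil (le_refl 0)]
    simp
  | succ k ih =>
    have hkN : k < N := by omega
    rw [show ((k+1:Nat):Int) = ((k:Nat):Int) + 1 by push_cast; ring,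
      PySem.List.pyRange_one_succ_right (by positivity), List.foldl_append, ih (by omega)]
    simp only [List.foldl_cons, List.foldl_nil]
    rw [pvStepM_mk L N k hkN]
    simp only [Prod.mk.injEq]
    refine ⟨?_, ?_, ?_⟩ <;>
    · apply pvMk_congr
      intro j hj
      by_cases hjk : j = k
      · subst hjk; simp
      · have : (j < k) ↔ (j < k + 1) := by omega
        simp [hjk, this]

lemma foldl_max_le (xs : List Int) (a m : Int) (ha : a ≤ m) (h : ∀ x ∈ xs, x ≤ m) :
    xs.foldl max a ≤ m := by
  induction xs generalizing a with
  | nil => simpa using ha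
  | cons x rest ih =>
    simp only [List.foldl_cons]
    exact ih (max a x) (by have := h x (by simp); omega) (fun y hy => h y (by simp [hy]))

lemma maxFold (xs : List Int) (hne : xs ≠ []) (hpos : ∀ x ∈ xs, 0 ≤ x) :
    (PySem.List.max? xs (fun x => x)).getD 0 = xs.foldl max 0 := by
  obtain ⟨m, hm⟩ : ∃ m, PySem.List.max? xs (fun x => x) = some m := by
    cases h : PySem.List.max? xs (fun x => x) with
    | none => exact absurd ((PySem.List.max?_eq_none_iff xs _).mp h) hne
    | some m => exact ⟨m, rfl⟩
  have hmem := PySem.List.max?_mem hm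
  have hmax := PySem.List.max?_isMax hm
  rw [hm]
  simp only [Option.getD_some]
  have h1 : xs.foldl max 0 ≤ m := foldl_max_le xs 0 m (hpos m hmem) (fun y hy => hmax y hy)
  have h2 : m ≤ xs.foldl max 0 := (PySem.List.le_foldl_max xs 0).2 m hmem
  omega

-- ===== VERDICT (by name: the statement is the Claim_ definition above) =====
theorem find_max_beads_spec : Claim_equal_find_max_beads := by
  intro s hdom hpre
  unfold Spec_find_max_beads
  have hcs : s.toList ≠ [] := by simpa using hpre
  have hm1' : 1 ≤ s.toList.length := List.length_pos_iff.mpr hcs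
  rw [find_max_beads, find_max_beads_alt, PySem.Str.len_eq]
  set cs : List Char := s.toList with hcsdef
  set m : Nat := cs.length with hmdef
  set L : List Char := cs ++ cs with hLdef
  have hm1 : 1 ≤ m := hm1'
  have hN : m * 2 = L.length := by simp [hLdef]; omega
  have hc1 : (↑m * 2 : Int) = ((m*2 : Nat) : Int) := by push_cast; ring
  have hc2 : (2 * ↑m : Int) = ((m*2 : Nat) : Int) := by push_cast; ring
  rw [hc1, hc2]
  rw [show ((m*2:Nat) : Int) - 1 = ((m*2-1 : Nat) : Int) by omega]
  have hzeros : (PySem.List.pyRange 0 ((m*2:Nat):Int) 1).map (fun _ => (0:Int)) = pvMk (m*2) (fun _ => 0) := by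
    rw [PySem.List.pyRange_zero_natCast, List.map_map]
    rfl
  rw [hzeros]
  rw [leftLoop L (m*2) hN (m*2-1) (le_refl _)]
  rw [rinitLemma L (m*2) hN (by omega)]
  rw [rightLoop L (m*2) hN (m*2-1) (le_refl _)]
  have hcapL : ∀ bad : Char, pvMk (m*2) (fun j => if j ≤ m*2-1 then pvL L bad j else 0) = pvMk (m*2) (pvL L bad) := by
    intro bad; apply pvMk_congr; intro j hj
    simp [show j ≤ m*2-1 by omega]
  simp only [hcapL]
  rw [mLoop L (m*2) (m*2) (le_refl _)]
  have hcapG : pvMk (m*2) (fun j => if j < m*2 then pvG L j else 0) = pvMk (m*2) (pvG L) := by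
    apply pvMk_congr; intro j hj; simp [hj]
  simp only [hcapG]
  rw [maxFold (pvMk (m*2) (pvG L)) (by simp [pvMk]; omega)
    (by intro x hx
        simp only [pvMk, List.mem_map, List.mem_range] at hx
        obtain ⟨j, -, rfl⟩ := hx
        exact pvG_nonneg L j)]
  rw [show pvMk (m*2) (pvG L) = (List.range (m*2)).map (pvG L) from rfl, List.foldl_map]
  rw [PySem.List.pyRange_zero_natCast, List.foldl_map]
  have hbody : (fun (best : Int) (k : Nat) =>
      max best (max (pvRun (PySem.List.slice L none (some ((k:Nat):Int))).reverse 'b')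
                    (pvRun (PySem.List.slice L none (some ((k:Nat):Int))).reverse 'r') +
                max (pvRun (PySem.List.slice L (some ((k:Nat):Int)) none) 'b')
                    (pvRun (PySem.List.slice L (some ((k:Nat):Int)) none) 'r')))
      = fun best j => max best (pvG L j) := by
    funext b j
    rw [PySem.List.slice_to_natCast, PySem.List.slice_from_natCast]
    unfold pvG pvL pvR
    rw [max_comm (pvRun ((L.take j).reverse) 'b') _, max_comm (pvRun (L.drop j) 'b') _]
  rw [hbody]
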